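-- pv_equiv track=rewrite | github.com/CommitteeOfPuchin/VKRINE-stickers | vkrine_stickerbot/utils.py | in_level_list
-- ===== SOURCE A (Python) =====
-- def in_level_list(src, check):
--     data = ["*", check]
--     split = check.split(".")
--     i = len(split) - 1
--     while i > 0:
--         subsplit = split[:i]
--         subsplit.append("*")
--         data.append(".".join(subsplit))
--         i -= 1
--     for element in data:
--         if element in src:
--             return True
-- ===== SOURCE B (Python) =====
-- def in_level_list(src, check):
--     for element in src:
--         if element == "*" or element == check:
--             return True
--         if element.endswith(".*") and check.startswith(element[:-1]):
--             return True
-- ===== Notes on version B (the rewrite author's own statement) =====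
-- stated objective: simpler
-- what changed: Instead of materialising the list of all wildcard candidates derived from check and testing each for membership in src, B makes a single pass over src and pattern-matches each element directly ('*', exact match, or a '.*'-suffixed pattern whose dotted prefix starts check).
import Mathlib
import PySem

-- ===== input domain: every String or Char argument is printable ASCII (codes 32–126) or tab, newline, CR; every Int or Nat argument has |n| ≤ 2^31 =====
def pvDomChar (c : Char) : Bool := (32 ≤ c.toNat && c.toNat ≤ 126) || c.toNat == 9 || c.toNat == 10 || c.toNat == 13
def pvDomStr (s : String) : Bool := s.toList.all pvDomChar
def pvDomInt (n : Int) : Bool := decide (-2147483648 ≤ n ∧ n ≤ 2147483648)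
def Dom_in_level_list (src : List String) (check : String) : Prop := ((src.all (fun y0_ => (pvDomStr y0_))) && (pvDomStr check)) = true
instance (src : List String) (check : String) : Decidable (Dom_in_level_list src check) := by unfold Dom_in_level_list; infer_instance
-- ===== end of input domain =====

-- B replaces A's generate-all-candidates-then-lookup with a single pass over src that
-- pattern-matches each element directly; same return value, no claim about speed.
-- Strings are compared via their character lists (String.toList is injective, so membership
-- and equality tests agree with Python's).

-- the while loop: i counts down, appending ".".join(split[:i] + ["*"]) for each i > 0
def pvAWhile (split : List (List Char)) (data : List (List Char)) : Nat → List (List Char)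
  | 0 => data
  | i + 1 =>
      pvAWhile split (data ++ [PySem.Chars.join ['.'] (split.take (i + 1) ++ [['*']])]) i

-- the for loop: first element of data that is in src returns True; falling off returns None
def pvAFor (srcL : List (List Char)) : List (List Char) → Option Bool
  | [] => none
  | e :: rest => if srcL.contains e then some true else pvAFor srcL rest

def in_level_list (src : List String) (check : String) : Option Bool :=
  let srcL := src.map String.toList
  let split := PySem.Chars.splitOn check.toList ['.']
  let data := pvAWhile split [['*'], check.toList] (split.length - 1)
  pvAFor srcL data

-- ===== PORT B =====
def pvBLoop (cs : List Char) : List (List Char) → Option Bool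
  | [] => none
  | e :: rest =>
      if e = ['*'] ∨ e = cs then some true
      else if PySem.Chars.endswith e ['.', '*']
              && PySem.Chars.startswith cs (PySem.Chars.slice e none (some (-1))) then some true
      else pvBLoop cs rest

def in_level_list_alt (src : List String) (check : String) : Option Bool :=
  pvBLoop check.toList (src.map String.toList)

-- ===== PRECONDITION & SPEC =====
def Spec_in_level_list (src : List String) (check : String) (out : Option Bool) : Prop := out = in_level_list_alt src check
instance (src : List String) (check : String) (out : Option Bool) : Decidable (Spec_in_level_list src check out) := by unfold Spec_in_level_list; infer_instance

-- ===== CLAIM (what is proved, stated in full; the proofs are below) =====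
def Claim_equal_in_level_list : Prop := ∀ (src : List String) (check : String), Dom_in_level_list src check → Spec_in_level_list src check (in_level_list src check)

-- ===== LEMMAS AND PROOFS =====


-- ===== LEMMAS AND PROOFS =====

-- intercalate helpers
theorem pvInter_singleton (s x : List Char) : List.intercalate s [x] = x := by
  simp [List.intercalate, List.intersperse]

theorem pvInter_cons (s x : List Char) (l : List (List Char)) (h : l ≠ []) :
    List.intercalate s (x :: l) = x ++ s ++ List.intercalate s l := by
  cases l with
  | nil => simp at h
  | cons y t => simp [List.intercalate, List.intersperse]

theorem pvInter_concat (s x : List Char) (l : List (List Char)) (h : l ≠ []) :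
    List.intercalate s (l ++ [x]) = List.intercalate s l ++ s ++ x := by
  induction l with
  | nil => simp at h
  | cons a t ih =>
    cases t with
    | nil => simp [pvInter_singleton, pvInter_cons]
    | cons b u =>
      rw [List.cons_append, pvInter_cons s a _ (by simp), pvInter_cons s a _ (by simp), ih (by simp)]
      simp

-- spec function for Python's check.split(".")
def pvSplitF : List Char → List Char → List (List Char)
  | [], cur => [cur.reverse]
  | c :: rest, cur => if c = '.' then cur.reverse :: pvSplitF rest [] else pvSplitF rest (c :: cur)

theorem pvSplitF_ne_nil (l cur : List Char) : pvSplitF l cur ≠ [] := by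
  induction l generalizing cur with
  | nil => simp [pvSplitF]
  | cons c rest ih => by_cases h : c = '.' <;> simp [pvSplitF, h, ih]

theorem pvSplitF_inter (l cur : List Char) :
    List.intercalate ['.'] (pvSplitF l cur) = cur.reverse ++ l := by
  induction l generalizing cur with
  | nil => simp [pvSplitF, pvInter_singleton]
  | cons c rest ih =>
    by_cases h : c = '.'
    · subst h
      rw [show pvSplitF ('.' :: rest) cur = cur.reverse :: pvSplitF rest [] from by simp [pvSplitF]]
      rw [pvInter_cons _ _ _ (pvSplitF_ne_nil _ _), ih]
      simp
    · rw [show pvSplitF (c :: rest) cur = pvSplitF rest (c :: cur) from by simp [pvSplitF, h]]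
      rw [ih]
      simp

theorem pvSplitF_dotfree (l cur : List Char) (hc : '.' ∉ cur) :
    ∀ p ∈ pvSplitF l cur, '.' ∉ p := by
  induction l generalizing cur with
  | nil => simpa [pvSplitF] using hc
  | cons c rest ih =>
    by_cases h : c = '.'
    · subst h
      rw [show pvSplitF ('.' :: rest) cur = cur.reverse :: pvSplitF rest [] from by simp [pvSplitF]]
      intro p hp
      rcases List.mem_cons.mp hp with rfl | hp
      · simpa using hc
      · exact ih [] (by simp) p hp
    · rw [show pvSplitF (c :: rest) cur = pvSplitF rest (c :: cur) from by simp [pvSplitF, h]]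
      exact ih (c :: cur) (by simp [hc, Ne.symm h])

theorem pvGo_eq (fuel : Nat) : ∀ (l cur : List Char) (acc : List (List Char)), l.length ≤ fuel →
    PySem.Chars.splitOn.go ['.'] fuel l cur acc = acc.reverse ++ pvSplitF l cur := by
  induction fuel with
  | zero =>
    intro l cur acc h
    have : l = [] := by cases l <;> simp_all
    subst this
    simp [PySem.Chars.splitOn.go, pvSplitF]
  | succ n ih =>
    intro l cur acc h
    cases l with
    | nil => simp [PySem.Chars.splitOn.go, pvSplitF]
    | cons c rest =>
      by_cases hc : c = '.'
      · subst hc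
        rw [show PySem.Chars.splitOn.go ['.'] (n+1) ('.'::rest) cur acc
              = PySem.Chars.splitOn.go ['.'] n rest [] (cur.reverse :: acc) from by
            simp [PySem.Chars.splitOn.go, List.isPrefixOf]]
        rw [ih rest [] _ (by simpa using Nat.le_of_succ_le_succ h)]
        simp [pvSplitF]
      · rw [show PySem.Chars.splitOn.go ['.'] (n+1) (c::rest) cur acc
              = PySem.Chars.splitOn.go ['.'] n rest (c :: cur) acc from by
            have hc' : ('.' = c) = False := by simp [Ne.symm hc]
            simp [PySem.Chars.splitOn.go, List.isPrefixOf, hc']]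
        rw [ih rest (c::cur) acc (by simpa using Nat.le_of_succ_le_succ h)]
        simp [pvSplitF, hc]

theorem pvSplitOn_eq (cs : List Char) : PySem.Chars.splitOn cs ['.'] = pvSplitF cs [] := by
  rw [PySem.Chars.splitOn, pvGo_eq (cs.length + 1) cs [] [] (by omega)]
  simp

theorem pvStep_iff (p T Y : List Char) (hp : '.' ∉ p) :
    (Y ++ ['.']) <+: (p ++ '.' :: T) ↔
      Y = p ∨ ∃ Y', Y = p ++ '.' :: Y' ∧ (Y' ++ ['.']) <+: T := by
  constructor
  · rintro ⟨z, hz⟩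
    rcases Nat.lt_trichotomy Y.length p.length with hlt | heq | hgt
    · exfalso
      have h1 : Y ++ ['.'] <+: p ++ '.' :: T := ⟨z, hz⟩
      have h2 : p <+: p ++ '.' :: T := List.prefix_append _ _
      have h3 : Y ++ ['.'] <+: p :=
        List.prefix_of_prefix_length_le h1 h2 (by simp; omega)
      exact hp (h3.subset (by simp))
    · left
      have h1 : Y <+: p ++ '.' :: T := ⟨['.'] ++ z, by simpa using hz⟩
      have h2 : p <+: p ++ '.' :: T := List.prefix_append _ _
      exact (List.prefix_of_prefix_length_le h1 h2 (by omega)).eq_of_length heq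
    · right
      have h1 : Y <+: p ++ '.' :: T := ⟨['.'] ++ z, by simpa using hz⟩
      have h2 : p <+: p ++ '.' :: T := List.prefix_append _ _
      obtain ⟨Y₂, rfl⟩ := List.prefix_of_prefix_length_le h2 h1 (by omega)
      cases Y₂ with
      | nil => simp at hgt
      | cons d Y' =>
        have hz' : (d :: Y') ++ ['.'] ++ z = '.' :: T := by
          have := hz
          simp only [List.append_assoc, List.append_cancel_left_eq] at this ⊢
          simpa using this
        have hd : d = '.' := by injection hz'
        subst hd
        refine ⟨Y', rfl, ⟨z, ?_⟩⟩
        injection hz'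
  · rintro (rfl | ⟨Y', rfl, ⟨z, hz⟩⟩)
    · exact ⟨T, by simp⟩
    · exact ⟨z, by simp [hz]⟩

theorem pvDotPrefix (sp : List (List Char)) (hdot : ∀ p ∈ sp, '.' ∉ p) (Y : List Char) :
    (Y ++ ['.']) <+: List.intercalate ['.'] sp ↔
      ∃ j, 1 ≤ j ∧ j + 1 ≤ sp.length ∧ Y = List.intercalate ['.'] (sp.take j) := by
  induction sp generalizing Y with
  | nil =>
    simp [List.intercalate]
  | cons p rest ih =>
    rcases List.eq_nil_or_concat rest with rfl | hne
    · rw [pvInter_singleton]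
      constructor
      · intro h
        exact absurd (h.subset (by simp)) (hdot p (by simp))
      · rintro ⟨j, h1, h2, _⟩
        simp at h2
        omega
    · have hrne : rest ≠ [] := by rcases hne with ⟨a, b, rfl⟩; simp
      rw [pvInter_cons _ _ _ hrne, List.append_assoc, List.singleton_append,
        pvStep_iff p _ Y (hdot p (by simp))]
      simp only [ih (fun q hq => hdot q (by simp [hq]))]
      constructor
      · rintro (rfl | ⟨Y', rfl, j, hj1, hj2, rfl⟩)
        · refine ⟨1, le_refl _, ?_, ?_⟩
          · cases rest with
            | nil => exact absurd rfl hrne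
            | cons a b => simp
          · simp [pvInter_singleton]
        · refine ⟨j + 1, by omega, by simp; omega, ?_⟩
          have htk : rest.take j ≠ [] := by
            cases rest with
            | nil => exact absurd rfl hrne
            | cons a b => simp; omega
          rw [List.take_succ_cons, pvInter_cons _ _ _ htk]
          simp
      · rintro ⟨j, hj1, hj2, rfl⟩
        match j, hj1 with
        | 1, _ =>
          left
          simp [pvInter_singleton]
        | (j' + 2), _ =>
          right
          have hj' : 1 ≤ j' + 1 ∧ j' + 1 + 1 ≤ rest.length := by simp at hj2; omega
          have htk : rest.take (j' + 1) ≠ [] := by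
            cases rest with
            | nil => exact absurd rfl hrne
            | cons a b => simp
          refine ⟨List.intercalate ['.'] (rest.take (j' + 1)), ?_, j' + 1, hj'.1, hj'.2, rfl⟩
          rw [List.take_succ_cons, pvInter_cons _ _ _ htk]
          simp

def pvPred (cs e : List Char) : Bool :=
  decide (e = ['*'] ∨ e = cs)
    || (PySem.Chars.endswith e ['.', '*']
        && PySem.Chars.startswith cs (PySem.Chars.slice e none (some (-1))))

theorem pvMem_aWhile (sp : List (List Char)) :
    ∀ (i : Nat) (data : List (List Char)) (e : List Char),
      e ∈ pvAWhile sp data i ↔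
        e ∈ data ∨ ∃ j, 1 ≤ j ∧ j ≤ i ∧ e = PySem.Chars.join ['.'] (sp.take j ++ [['*']]) := by
  intro i
  induction i with
  | zero => intro data e; simp [pvAWhile]
  | succ n ih =>
    intro data e
    rw [pvAWhile, ih]
    simp only [List.mem_append, List.mem_singleton]
    constructor
    · rintro ((h | rfl) | ⟨j, h1, h2, rfl⟩)
      · exact Or.inl h
      · exact Or.inr ⟨n + 1, by omega, le_refl _, rfl⟩
      · exact Or.inr ⟨j, h1, by omega, rfl⟩
    · rintro (h | ⟨j, h1, h2, rfl⟩)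
      · exact Or.inl (Or.inl h)
      · rcases Nat.lt_or_ge j (n + 1) with hj | hj
        · exact Or.inr ⟨j, h1, by omega, rfl⟩
        · have : j = n + 1 := by omega
          subst this
          exact Or.inl (Or.inr rfl)

theorem pvAFor_eq (srcL : List (List Char)) :
    ∀ data : List (List Char),
      pvAFor srcL data = if data.any (fun e => srcL.contains e) then some true else none := by
  intro data
  induction data with
  | nil => simp [pvAFor]
  | cons e rest ih =>
    rw [pvAFor, ih]
    by_cases h : e ∈ srcL <;> simp [h]

theorem pvBLoop_eq (cs : List Char) :
    ∀ l : List (List Char),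
      pvBLoop cs l = if l.any (pvPred cs) then some true else none := by
  intro l
  induction l with
  | nil => simp [pvBLoop]
  | cons e rest ih =>
    rw [pvBLoop, ih]
    simp only [List.any_cons, Bool.or_eq_true]
    by_cases h1 : e = ['*'] ∨ e = cs
    · simp [pvPred, h1]
    · rw [if_neg h1]
      by_cases h2 : (PySem.Chars.endswith e ['.', '*']
          && PySem.Chars.startswith cs (PySem.Chars.slice e none (some (-1)))) = true
      · rw [if_pos h2]
        simp only [PySem.Chars.slice_eq_listSlice] at h2
        simp [pvPred, h1, h2]
      · rw [if_neg h2]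
        have hpf : pvPred cs e = false := by
          simp only [pvPred, Bool.or_eq_false_iff, decide_eq_false_iff_not]
          exact ⟨h1, Bool.eq_false_iff.mpr h2⟩
        simp [hpf]

theorem pvPattern_iff (cs e : List Char) :
    (PySem.Chars.endswith e ['.', '*']
        && PySem.Chars.startswith cs (PySem.Chars.slice e none (some (-1)))) = true ↔
      ∃ j, 1 ≤ j ∧ j ≤ (pvSplitF cs []).length - 1 ∧
        e = PySem.Chars.join ['.'] ((pvSplitF cs []).take j ++ [['*']]) := by
  have hsp : List.intercalate ['.'] (pvSplitF cs []) = cs := by simpa using pvSplitF_inter cs []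
  have hdot : ∀ p ∈ pvSplitF cs [], '.' ∉ p := pvSplitF_dotfree cs [] (by simp)
  have hlen : 1 ≤ (pvSplitF cs []).length := by
    cases h : pvSplitF cs [] with
    | nil => exact absurd h (pvSplitF_ne_nil cs [])
    | cons a b => simp
  have hchar : ∀ Y : List Char, ((Y ++ ['.']) <+: cs) ↔
      ∃ j, 1 ≤ j ∧ j + 1 ≤ (pvSplitF cs []).length ∧
        Y = List.intercalate ['.'] ((pvSplitF cs []).take j) := by
    intro Y
    conv_lhs => rw [← hsp]
    exact pvDotPrefix _ hdot Y
  constructor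
  · intro h
    rw [Bool.and_eq_true, PySem.Chars.endswith_iff, PySem.Chars.startswith_iff] at h
    obtain ⟨⟨Y, rfl⟩, hpre⟩ := h
    rw [show Y ++ ['.', '*'] = (Y ++ ['.']) ++ ['*'] from by simp,
      PySem.Chars.slice_eq_listSlice, PySem.List.slice_to_neg_one, List.dropLast_concat] at hpre
    rw [hchar] at hpre
    obtain ⟨j, hj1, hj2, rfl⟩ := hpre
    have htk : (pvSplitF cs []).take j ≠ [] := by
      cases h : pvSplitF cs [] with
      | nil => exact absurd h (pvSplitF_ne_nil cs [])
      | cons a b => simp; omega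
    refine ⟨j, hj1, by omega, ?_⟩
    rw [PySem.Chars.join, pvInter_concat _ _ _ htk]
    simp
  · rintro ⟨j, hj1, hj2, rfl⟩
    have htk : (pvSplitF cs []).take j ≠ [] := by
      cases h : pvSplitF cs [] with
      | nil => exact absurd h (pvSplitF_ne_nil cs [])
      | cons a b => simp; omega
    rw [PySem.Chars.join, pvInter_concat _ _ _ htk]
    rw [Bool.and_eq_true, PySem.Chars.endswith_iff, PySem.Chars.startswith_iff]
    constructor
    · exact ⟨List.intercalate ['.'] ((pvSplitF cs []).take j), by simp⟩
    · rw [show List.intercalate ['.'] ((pvSplitF cs []).take j) ++ ['.'] ++ ['*']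
            = (List.intercalate ['.'] ((pvSplitF cs []).take j) ++ ['.']) ++ ['*'] from by simp,
        PySem.Chars.slice_eq_listSlice, PySem.List.slice_to_neg_one, List.dropLast_concat]
      rw [hchar]
      exact ⟨j, hj1, by omega, rfl⟩

theorem pvMem_data_iff (cs e : List Char) :
    e ∈ pvAWhile (pvSplitF cs []) [['*'], cs] ((pvSplitF cs []).length - 1) ↔ pvPred cs e = true := by
  rw [pvMem_aWhile]
  rw [pvPred, Bool.or_eq_true, decide_eq_true_iff, ← pvPattern_iff]
  simp

theorem pvCond_eq (srcL : List (List Char)) (cs : List Char) :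
    (pvAWhile (pvSplitF cs []) [['*'], cs] ((pvSplitF cs []).length - 1)).any
        (fun e => srcL.contains e)
      = srcL.any (pvPred cs) := by
  rw [Bool.eq_iff_iff]
  simp only [List.any_eq_true, List.contains_iff_mem]
  constructor
  · rintro ⟨e, hed, hes⟩
    exact ⟨e, hes, (pvMem_data_iff cs e).mp hed⟩
  · rintro ⟨e, hes, hp⟩
    exact ⟨e, (pvMem_data_iff cs e).mpr hp, hes⟩

-- ===== VERDICT (by name: the statement is the Claim_ definition above) =====
theorem in_level_list_spec : Claim_equal_in_level_list := by
  intro src check _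
  unfold Spec_in_level_list
  simp only [in_level_list, in_level_list_alt, pvSplitOn_eq]
  rw [pvAFor_eq, pvBLoop_eq, pvCond_eq]
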